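-- pv_equiv track=rewrite | github.com/xwanglvssxq/Digitalized-ECT-Distance | ect_tools.py | elementary_split
-- ===== SOURCE A (Python) =====
-- from collections import Counter
--
-- def elementary_split(cycle):
--     '''
--     Splits the cycle into 2 pieces
--     New Mar 18
--     '''
--     new_inds=cycle[:-1]
--     counts=Counter(new_inds)
--     tmp=[*counts.values()]
--     tmp2=[*counts.keys()]
--     indices=[i for i, elem in enumerate(tmp) if elem>1]
--     value2=tmp2[indices[0]] # Note: only allow one of these
--     indices2=[i for i, elem in enumerate(new_inds) if elem==value2]
--     list1=[*new_inds[:indices2[0]],*new_inds[indices2[1]:]]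
--     list1.append(list1[0])
--     list2=[*new_inds[indices2[0]:indices2[1]]]
--     list2.append(list2[0])
--     return(list1,list2)
-- ===== SOURCE B (Python) =====
-- def elementary_split(cycle):
--     new_inds = cycle[:-1]
--     for i0, x in enumerate(new_inds):
--         tail = new_inds[i0 + 1:]
--         if x in tail:
--             i1 = i0 + 1 + tail.index(x)
--             list1 = new_inds[:i0] + new_inds[i1:]
--             list2 = new_inds[i0:i1]
--             return (list1 + [list1[0]], list2 + [x])
--     raise IndexError('cycle has no repeated vertex')
-- ===== Notes on version B (the rewrite author's own statement) =====
-- stated objective: alternative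
-- what changed: B drops A's Counter/keys/values tables entirely: a single forward scan finds the first position whose vertex reoccurs later (membership in the remaining suffix) and reads the second occurrence with tail.index, so no frequency table and no enumerate-the-values pass exist; it trades the hash table for suffix scans.
import Mathlib
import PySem

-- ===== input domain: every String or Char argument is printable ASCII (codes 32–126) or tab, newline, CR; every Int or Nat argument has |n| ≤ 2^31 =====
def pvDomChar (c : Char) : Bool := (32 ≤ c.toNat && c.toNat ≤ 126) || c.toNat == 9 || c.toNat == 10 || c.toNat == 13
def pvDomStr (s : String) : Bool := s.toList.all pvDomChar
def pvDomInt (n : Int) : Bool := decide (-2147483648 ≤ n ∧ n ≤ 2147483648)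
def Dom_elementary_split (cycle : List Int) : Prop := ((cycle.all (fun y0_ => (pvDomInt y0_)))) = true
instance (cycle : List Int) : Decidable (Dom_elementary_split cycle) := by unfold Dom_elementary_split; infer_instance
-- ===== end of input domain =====

-- B discards A's Counter/keys/values tables: one forward scan finds the first position whose
-- vertex reoccurs in the remaining suffix and reads the second occurrence with tail.index
-- (objective: alternative — no frequency table at all, suffix scans instead).

-- ===== PORT A =====
def elementary_split (cycle : List Int) : List Int × List Int :=
  let new_inds := PySem.List.slice cycle none (some (-1))
  let counts := PySem.Dict.counter new_inds
  let tmp := PySem.Dict.values counts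
  let tmp2 := PySem.Dict.keys counts
  let indices := ((PySem.List.enumerate tmp 0).filter (fun p => decide (1 < p.2))).map (fun p => p.1)
  match PySem.List.pyGet? indices 0 with
  | none => ([], [])            -- Python: IndexError on indices[0]
  | some i =>
    match PySem.List.pyGet? tmp2 i with
    | none => ([], [])          -- unreachable in Python (i is a valid index of tmp2)
    | some value2 =>
      let indices2 := ((PySem.List.enumerate new_inds 0).filter (fun p => p.2 == value2)).map (fun p => p.1)
      match PySem.List.pyGet? indices2 0, PySem.List.pyGet? indices2 1 with
      | some j0, some j1 =>
        let list1 := PySem.List.slice new_inds none (some j0) ++ PySem.List.slice new_inds (some j1) none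
        match PySem.List.pyGet? list1 0 with
        | none => ([], [])      -- Python: IndexError on list1[0]
        | some h1 =>
          let list2 := PySem.List.slice new_inds (some j0) (some j1)
          match PySem.List.pyGet? list2 0 with
          | none => ([], [])    -- Python: IndexError on list2[0]
          | some h2 => (list1 ++ [h1], list2 ++ [h2])
      | _, _ => ([], [])        -- Python: IndexError on indices2[0]/indices2[1]

-- ===== PORT B =====
-- the 'for i0, x in enumerate(new_inds)' loop of Source B, as recursion on the loop counter i0;
-- slices with the Nat counters 0 ≤ i0 ≤ i1 are exactly List.take/drop
def esGo (new_inds : List Int) (i0 : Nat) : List Int × List Int :=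
  if h : i0 < new_inds.length then
    let x := new_inds[i0]
    let tail := new_inds.drop (i0 + 1)
    if x ∈ tail then
      match PySem.List.index? tail x with
      | some j =>
        let i1 := i0 + 1 + j
        let list1 := new_inds.take i0 ++ new_inds.drop i1
        let list2 := (new_inds.drop i0).take (i1 - i0)
        match list1.head? with
        | some h1 => (list1 ++ [h1], list2 ++ [x])
        | none => ([], [])
      | none => ([], [])
    else esGo new_inds (i0 + 1)
  else ([], [])
termination_by new_inds.length - i0


def elementary_split_alt (cycle : List Int) : List Int × List Int :=
  esGo (PySem.List.slice cycle none (some (-1))) 0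

-- ===== PRECONDITION & SPEC =====
-- Pre_ excludes exactly the inputs where cycle[:-1] has no repeated vertex: there both A and B
-- raise IndexError (A on indices[0], B by its explicit raise after the loop).
def Pre_elementary_split (cycle : List Int) : Prop := ¬ (cycle.dropLast).Nodup
instance (cycle : List Int) : Decidable (Pre_elementary_split cycle) := by unfold Pre_elementary_split; infer_instance
def pvWitness_elementary_split : List Int := [1, 2, 1, 3]
def Spec_elementary_split (cycle : List Int) (out : List Int × List Int) : Prop := out = elementary_split_alt cycle
instance (cycle : List Int) (out : List Int × List Int) : Decidable (Spec_elementary_split cycle out) := by unfold Spec_elementary_split; infer_instance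

-- ===== CLAIM (what is proved, stated in full; the proofs are below) =====
def Claim_equal_elementary_split : Prop := ∀ (cycle : List Int), Dom_elementary_split cycle → Pre_elementary_split cycle → Spec_elementary_split cycle (elementary_split cycle)

-- ===== LEMMAS AND PROOFS =====

def pvSrep : List Int → Option (Nat × Int × Nat)
  | [] => none
  | x :: t =>
    match PySem.List.index? t x with
    | some j => some (0, x, j)
    | none => (pvSrep t).map (fun p => (p.1 + 1, p.2))

theorem pv_discard_not_mem (s : PySem.Set Int) (x : Int) (h : x ∉ s) : PySem.Set.discard s x = s := by
  simp only [PySem.Set.discard]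
  rw [List.filter_eq_self]
  intro a ha
  simp
  exact fun hc => h (hc ▸ ha)

theorem pv_filter_cons_not_mem (y : Int) (t : List Int) (h : y ∉ t) :
    ((PySem.Set.ofList (y::t)).filter (fun v => decide (1 < (((y::t).count v : Int)))))
    = ((PySem.Set.ofList t).filter (fun v => decide (1 < ((t.count v : Int))))) := by
  rw [PySem.Set.ofList_cons, pv_discard_not_mem _ _ (fun hc => h ((PySem.Set.mem_ofList _ _).mp hc))]
  rw [List.filter_cons]
  have hcy : (y::t).count y = 1 := by
    rw [List.count_cons_self, List.count_eq_zero.mpr h]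
  simp only [hcy]
  norm_num
  apply List.filter_congr
  intro v hv
  have hvt : v ∈ t := (PySem.Set.mem_ofList _ _).mp hv
  have hvy : v ≠ y := fun hc => h (hc ▸ hvt)
  rw [List.count_cons_of_ne (Ne.symm hvy)]

theorem pvSrep_none (l : List Int) : pvSrep l = none →
    ((PySem.Set.ofList l).filter (fun v => decide (1 < (l.count v : Int)))).head? = none := by
  induction l with
  | nil => intro _; rfl
  | cons y t ih =>
    intro h
    unfold pvSrep at h
    rcases ho : PySem.List.index? t y with _ | j
    · rw [ho] at h
      simp only [Option.map_eq_none_iff] at h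
      have hy : y ∉ t := (PySem.List.index?_eq_none_iff _ _).mp ho
      rw [pv_filter_cons_not_mem y t hy]
      exact ih h
    · rw [ho] at h; simp at h

def pvOcc (s : Int) (l : List Int) (x : Int) : List Int :=
  ((PySem.List.enumerate l s).filter (fun p => p.2 == x)).map (fun p => p.1)

theorem pvOcc_head (t : List Int) (x : Int) : ∀ (s : Int) (j : Nat),
    PySem.List.index? t x = some j → (pvOcc s t x).head? = some (s + j) := by
  induction t with
  | nil => intro s j h; simp [PySem.List.index?_eq_idxOf?] at h
  | cons y t ih =>
    intro s j h
    by_cases hxy : y = x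
    · subst hxy
      rw [PySem.List.index?_cons_self] at h
      cases h
      simp [pvOcc, PySem.List.enumerate_cons]
    · rw [PySem.List.index?_cons_of_ne t hxy] at h
      rcases ho : PySem.List.index? t x with _ | j'
      · rw [ho] at h; simp at h
      · rw [ho] at h; simp at h
        have := ih (s + 1) j' ho
        unfold pvOcc at this ⊢
        rw [PySem.List.enumerate_cons, List.filter_cons]
        simp only [show ((s, y).2 == x) = false by simpa using hxy, Bool.false_eq_true, if_false]
        rw [this]
        congr 1
        omega

theorem pvSrep_some (l : List Int) : ∀ (s : Int) (i0 : Nat) (x : Int) (j : Nat),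
    pvSrep l = some (i0, x, j) →
    ((PySem.Set.ofList l).filter (fun v => decide (1 < (l.count v : Int)))).head? = some x
    ∧ l[i0]? = some x
    ∧ (pvOcc s l x)[0]? = some (s + i0)
    ∧ (pvOcc s l x)[1]? = some (s + i0 + 1 + j) := by
  induction l with
  | nil => intro s i0 x j h; simp [pvSrep] at h
  | cons y t ih =>
    intro s i0 x j h
    unfold pvSrep at h
    rcases ho : PySem.List.index? t y with _ | j'
    · rw [ho] at h
      simp only [Option.map_eq_some_iff] at h
      obtain ⟨⟨i0', x', j''⟩, hp, he⟩ := h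
      cases he
      have hy : y ∉ t := (PySem.List.index?_eq_none_iff _ _).mp ho
      obtain ⟨ha, hb, hc, hd⟩ := ih (s + 1) i0' x j hp
      have hxt : x ∈ t := by
        have h2 := List.getElem?_eq_some_iff.mp hb
        exact h2.choose_spec ▸ List.getElem_mem _
      have hxy : x ≠ y := fun hcc => hy (hcc ▸ hxt)
      have hocc : pvOcc s (y::t) x = pvOcc (s+1) t x := by
        unfold pvOcc
        rw [PySem.List.enumerate_cons, List.filter_cons]
        simp only [show ((s, y).2 == x) = false by simpa using (Ne.symm hxy), Bool.false_eq_true, if_false]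
      refine ⟨?_, ?_, ?_, ?_⟩
      · rw [pv_filter_cons_not_mem y t hy]; exact ha
      · simpa using hb
      · rw [hocc, hc]; congr 1; push_cast; ring
      · rw [hocc, hd]; congr 1; push_cast; ring
    · rw [ho] at h
      simp only [Option.some.injEq] at h
      cases h
      have hyt : y ∈ t := by
        have h2 : (PySem.List.index? t y).isSome = true := by rw [ho]; rfl
        exact (PySem.List.index?_isSome_iff _ _).mp h2
      refine ⟨?_, by simp, ?_, ?_⟩
      · rw [PySem.Set.ofList_cons, List.filter_cons]
        have hcnt : 1 < ((y::t).count y : Int) := by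
          have h3 := List.count_pos_iff.mpr hyt
          rw [List.count_cons_self]
          push_cast
          omega
        simp only [hcnt, decide_true, if_true]
        rfl
      · unfold pvOcc
        rw [PySem.List.enumerate_cons, List.filter_cons]
        simp
      · unfold pvOcc
        rw [PySem.List.enumerate_cons, List.filter_cons]
        simp only [show ((s, y).2 == y) = true by simp, if_true]
        rw [List.map_cons, List.getElem?_cons_succ]
        have h4 := pvOcc_head t y (s+1) j ho
        unfold pvOcc at h4
        rw [List.head?_eq_getElem?] at h4
        rw [h4]
        congr 1
        push_cast
        ring



-- selection: "key at the first index whose value is > 1" is "first key whose value is > 1".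
theorem pv_select (f : Int → Int) : ∀ (K : List Int) (s : Int),
    ((((PySem.List.enumerate (K.map f) s).filter (fun p => decide (1 < p.2))).map (fun p => p.1)).head?.bind
      (fun i => PySem.List.pyGet? K (i - s)))
    = (K.filter (fun v => decide (1 < f v))).head? := by
  intro K
  induction K with
  | nil => intro s; simp [PySem.List.enumerate_nil]
  | cons x t ih =>
    intro s
    rw [List.map_cons, PySem.List.enumerate_cons]
    by_cases h : 1 < f x
    · simp [h]
    · rw [List.filter_cons, List.filter_cons]
      simp only [h, decide_false, Bool.false_eq_true, if_false]
      rw [← ih (s + 1)]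
      rcases hh : (((PySem.List.enumerate (t.map f) (s + 1)).filter (fun p => decide (1 < p.2))).map (fun p => p.1)).head? with _ | i
      · rw [hh]; simp
      · have hmem : i ∈ ((PySem.List.enumerate (t.map f) (s + 1)).filter (fun p => decide (1 < p.2))).map (fun p => p.1) :=
          List.mem_of_mem_head? hh
        simp only [List.mem_map, List.mem_filter] at hmem
        obtain ⟨p, ⟨hp, _⟩, rfl⟩ := hmem
        rw [PySem.List.mem_enumerate_iff] at hp
        obtain ⟨k, hk, rfl⟩ := hp
        rw [hh]
        simp only [Option.bind_some]
        have h1 : (s + 1 + (k : Int), (t.map f)[k]).1 - s = ((k + 1 : Nat) : Int) := by push_cast; ring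
        have h2 : (s + 1 + (k : Int), (t.map f)[k]).1 - (s + 1) = ((k : Nat) : Int) := by push_cast; ring
        rw [h1, h2, PySem.List.pyGet?_natCast, PySem.List.pyGet?_natCast]
        simp

theorem esGo_spec (l : List Int) : ∀ (n k : Nat), l.length - k = n → k ≤ l.length →
    esGo l k = match pvSrep (l.drop k) with
    | none => ([], [])
    | some (d, x, j) =>
        let list1 := l.take (k + d) ++ l.drop (k + d + 1 + j)
        match list1.head? with
        | some h1 => (list1 ++ [h1], (l.drop (k + d)).take (1 + j) ++ [x])
        | none => ([], []) := by
  intro n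
  induction n with
  | zero =>
    intro k hn hk
    have hke : k = l.length := by omega
    subst hke
    rw [List.drop_length]
    rw [esGo]
    simp [pvSrep]
  | succ n ih =>
    intro k hn hk
    have hklt : k < l.length := by omega
    have hdrop : l.drop k = l[k] :: l.drop (k+1) := List.drop_eq_getElem_cons hklt
    rw [esGo, dif_pos hklt]
    show (if l[k] ∈ l.drop (k+1) then _ else _) = _
    rcases hidx : PySem.List.index? (l.drop (k+1)) l[k] with _ | j
    · have hnm : l[k] ∉ l.drop (k+1) := (PySem.List.index?_eq_none_iff _ _).mp hidx
      have hcons : pvSrep (l[k] :: l.drop (k+1)) = (pvSrep (l.drop (k+1))).map (fun p => (p.1+1, p.2)) := by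
        show (match PySem.List.index? (l.drop (k+1)) l[k] with
          | some j => some (0, l[k], j)
          | none => (pvSrep (l.drop (k+1))).map (fun p : Nat × Int × Nat => (p.1 + 1, p.2))) = _
        rw [hidx]
      rw [if_neg hnm, ih (k+1) (by omega) (by omega)]
      conv_rhs => rw [hdrop, hcons]
      rcases hs : pvSrep (l.drop (k+1)) with _ | ⟨d, x, j⟩
      · rfl
      · simp only [Option.map_some]
        have e1 : k + (d + 1) = k + 1 + d := by omega
        have e2 : k + (d + 1) + 1 + j = k + 1 + d + 1 + j := by omega
        rw [e2, e1]
    · have hm : l[k] ∈ l.drop (k+1) := by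
        have h2 : (PySem.List.index? (l.drop (k+1)) l[k]).isSome = true := by rw [hidx]; rfl
        exact (PySem.List.index?_isSome_iff _ _).mp h2
      have hcons : pvSrep (l[k] :: l.drop (k+1)) = some (0, l[k], j) := by
        show (match PySem.List.index? (l.drop (k+1)) l[k] with
          | some j => some (0, l[k], j)
          | none => (pvSrep (l.drop (k+1))).map (fun p : Nat × Int × Nat => (p.1 + 1, p.2))) = _
        rw [hidx]
      rw [if_pos hm]
      conv_rhs => rw [hdrop, hcons]
      dsimp only
      simp only [Nat.add_zero]
      have e3 : k + 1 + j - k = 1 + j := by omega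
      rw [e3]

-- ===== VERDICT (by name: the statement is the Claim_ definition above) =====
theorem elementary_split_spec : Claim_equal_elementary_split := by
  intro cycle _ _
  unfold Spec_elementary_split elementary_split elementary_split_alt
  simp only [PySem.List.slice_to_neg_one]
  set l := cycle.dropLast with hl
  rw [PySem.Dict.keys_counter]
  have hvals : PySem.Dict.values (PySem.Dict.counter l) = (PySem.Set.ofList l).map (fun v => (l.count v : Int)) := by
    simp [PySem.Dict.values, PySem.Dict.items_counter, List.map_map, Function.comp_def]
  rw [hvals]
  rw [esGo_spec l (l.length - 0) 0 rfl (by omega), List.drop_zero]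
  simp only [Nat.zero_add]
  have hsel := pv_select (fun v => (l.count v : Int)) (PySem.Set.ofList l) 0
  simp only [sub_zero] at hsel
  simp only [PySem.List.pyGet?_zero, ← List.head?_eq_getElem?]
  rcases hsr : pvSrep l with _ | ⟨d, x, j⟩
  · have hnone := pvSrep_none l hsr
    rw [hnone] at hsel
    rcases hA : (((PySem.List.enumerate ((PySem.Set.ofList l).map (fun v => (l.count v : Int))) 0).filter (fun p => decide (1 < p.2))).map (fun p => p.1)).head? with _ | i
    · rw [hA]
    · rw [hA] at hsel
      simp only [Option.bind_some] at hsel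
      rw [hA]
      dsimp only
      rw [hsel]
  · obtain ⟨ha, hb, hc, hd⟩ := pvSrep_some l 0 d x j hsr
    rw [ha] at hsel
    rw [Option.bind_eq_some_iff] at hsel
    obtain ⟨i, hi, hKi⟩ := hsel
    rw [hi]
    dsimp only
    rw [hKi]
    dsimp only
    have hE0 : ((List.filter (fun p => p.2 == x) (PySem.List.enumerate l 0)).map (fun p => p.1)).head? = some ((d : Nat) : Int) := by
      have h5 : (pvOcc 0 l x).head? = some ((d : Nat) : Int) := by
        rw [List.head?_eq_getElem?, hc]
        norm_num
      unfold pvOcc at h5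
      exact h5
    have hE1 : PySem.List.pyGet? ((List.filter (fun p => p.2 == x) (PySem.List.enumerate l 0)).map (fun p => p.1)) 1 = some (((d + 1 + j : Nat)) : Int) := by
      have h5 : (pvOcc 0 l x)[1]? = some (((d + 1 + j : Nat)) : Int) := by
        rw [hd]
        congr 1
        push_cast
        ring
      unfold pvOcc at h5
      rw [PySem.List.pyGet?_of_nonneg _ (by norm_num)]
      exact h5
    rw [hE0, hE1]
    dsimp only
    rw [PySem.List.slice_to_natCast, PySem.List.slice_from_natCast, PySem.List.slice_natCast]
    have e4 : d + 1 + j - d = 1 + j := by omega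
    rw [e4]
    have hx2 : ((l.drop d).take (1 + j)).head? = some x := by
      obtain ⟨hdl, hgx⟩ := List.getElem?_eq_some_iff.mp hb
      rw [List.drop_eq_getElem_cons hdl]
      have e5 : 1 + j = j + 1 := by omega
      rw [e5, List.take_succ_cons, List.head?_cons, hgx]
    rcases hL : (List.take d l ++ List.drop (d + 1 + j) l).head? with _ | h1
    · rfl
    · dsimp only
      rw [hx2]
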